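-- pv_equiv track=rewrite | github.com/anpa1200/lpi | main(1.0).py | headers
-- ===== SOURCE A (Python) =====
-- def headers(text: list[str]) -> list[str]:
--     """Extract question stems (headers) per question."""
--     headerlist = []
--     header = ""
--     listex = ("Ex", "A.", "B.", "C.", "D.", "E.")
--     for line in text:
--         if len(line) < 3 or line[:2] in listex:
--             if len(header) >= 1:
--                 headerlist.append(header)
--                 header = ""
--         else:
--             header = header + line
--     return headerlist
-- ===== SOURCE B (Python) =====
-- def headers(text: list[str]) -> list[str]:
--     """Extract question stems (headers) per question."""
--     listex = ("Ex", "A.", "B.", "C.", "D.", "E.")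
--
--     def is_sep(line):
--         return len(line) < 3 or line[:2] in listex
--
--     result = []
--     i, n = 0, len(text)
--     while i < n:
--         if is_sep(text[i]):
--             i += 1
--         else:
--             j = i
--             while j < n and not is_sep(text[j]):
--                 j += 1
--             if j < n:  # a separator follows: flush the run; a trailing run is dropped
--                 result.append("".join(text[i:j]))
--             i = j
--     return result
-- ===== Notes on version B (the rewrite author's own statement) =====
-- stated objective: alternative
-- what changed: A is a per-line state machine folding an accumulator string and flushing it on each separator line; B is a span scan that skips separators, takes each maximal run of content lines, joins the run in one step, and emits it only when a separator line follows (so a trailing run is dropped, as in A).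
import Mathlib
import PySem

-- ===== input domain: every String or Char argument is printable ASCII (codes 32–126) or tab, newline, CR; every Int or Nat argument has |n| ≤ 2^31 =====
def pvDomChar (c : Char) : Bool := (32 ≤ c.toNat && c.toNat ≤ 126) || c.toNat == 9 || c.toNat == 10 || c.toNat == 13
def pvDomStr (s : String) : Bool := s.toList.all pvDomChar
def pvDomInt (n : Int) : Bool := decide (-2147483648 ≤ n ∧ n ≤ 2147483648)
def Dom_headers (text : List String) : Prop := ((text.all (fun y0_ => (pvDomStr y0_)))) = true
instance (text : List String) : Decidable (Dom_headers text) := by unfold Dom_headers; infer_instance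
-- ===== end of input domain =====

-- B replaces A's per-line accumulator state machine by a span scan (skip separators,
-- take a maximal content run, join it, flush only when a separator follows): alternative decomposition.

-- ===== PORT A =====
-- listex = ("Ex", "A.", "B.", "C.", "D.", "E.")
def headersListex : List String := ["Ex", "A.", "B.", "C.", "D.", "E."]

def headers (text : List String) : List String :=
  (text.foldl
    (fun (st : List String × String) line =>
      if PySem.Str.len line < 3 ∨ PySem.Str.slice line none (some 2) ∈ headersListex then
        if 1 ≤ PySem.Str.len st.2 then (st.1 ++ [st.2], "") else st
      else (st.1, st.2 ++ line))
    ([], "")).1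

-- ===== PORT B =====
def headersIsSep (line : String) : Bool :=
  decide (PySem.Str.len line < 3) ||
    decide (PySem.Str.slice line none (some 2) ∈ ["Ex", "A.", "B.", "C.", "D.", "E."])

def headers_alt : List String → List String
  | [] => []
  | l :: rest =>
    if headersIsSep l then headers_alt rest
    else
      match _h : (l :: rest).dropWhile (fun x => !headersIsSep x) with
      | [] => []
      | s :: rest' =>
        PySem.Str.join "" ((l :: rest).takeWhile (fun x => !headersIsSep x))
          :: headers_alt (s :: rest')
termination_by text => text.length
decreasing_by
  · simp
  · have hlen : (s :: rest').length ≤ rest.length := by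
      rw [List.dropWhile_cons_of_pos (by simp [*])] at _h
      calc (s :: rest').length = (rest.dropWhile (fun x => !headersIsSep x)).length := by rw [_h]
        _ ≤ rest.length := List.length_dropWhile_le _ _
    simpa using Nat.lt_succ_of_le hlen

-- ===== PRECONDITION & SPEC =====
def Spec_headers (text : List String) (out : List String) : Prop := out = headers_alt text
instance (text : List String) (out : List String) : Decidable (Spec_headers text out) := by unfold Spec_headers; infer_instance

-- ===== CLAIM (what is proved, stated in full; the proofs are below) =====
def Claim_equal_headers : Prop := ∀ (text : List String), Dom_headers text → Spec_headers text (headers text)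

-- ===== LEMMAS AND PROOFS =====

-- ===== LEMMAS AND PROOFS =====

def headersStep (st : List String × String) (line : String) : List String × String :=
  if PySem.Str.len line < 3 ∨ PySem.Str.slice line none (some 2) ∈ headersListex then
    if 1 ≤ PySem.Str.len st.2 then (st.1 ++ [st.2], "") else st
  else (st.1, st.2 ++ line)

theorem headers_eq_foldl (text : List String) :
    headers text = (text.foldl headersStep ([], "")).1 := rfl

def goA (hd : String) : List String → List String
  | [] => []
  | l :: rest =>
    if headersIsSep l then
      (if 1 ≤ PySem.Str.len hd then hd :: goA "" rest else goA "" rest)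
    else goA (hd ++ l) rest

theorem sep_iff (l : String) :
    (PySem.Str.len l < 3 ∨ PySem.Str.slice l none (some 2) ∈ headersListex) ↔ headersIsSep l = true := by
  simp [headersIsSep, headersListex]

theorem len_empty : PySem.Str.len "" = 0 := by simp [PySem.Str.len_eq]

theorem len_small_empty (hd : String) (hh : ¬ 1 ≤ PySem.Str.len hd) : hd = "" := by
  apply String.toList_inj.mp
  rw [PySem.Str.len_eq] at hh
  have : hd.toList.length = 0 := by omega
  simpa using List.length_eq_zero_iff.mp this

theorem foldl_fst (text : List String) : ∀ (acc : List String) (hd : String),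
    (text.foldl headersStep (acc, hd)).1 = acc ++ goA hd text := by
  induction text with
  | nil => intro acc hd; simp [goA]
  | cons l rest ih =>
    intro acc hd
    by_cases hc : headersIsSep l = true
    · by_cases hh : 1 ≤ PySem.Str.len hd
      · simp only [List.foldl_cons, headersStep, if_pos ((sep_iff l).mpr hc), if_pos hh, goA,
          hc, if_true]
        rw [ih]; simp
      · simp only [List.foldl_cons, headersStep, if_pos ((sep_iff l).mpr hc), if_neg hh, goA,
          hc, if_true]
        rw [len_small_empty hd hh]
        exact ih acc ""
    · simp only [List.foldl_cons, headersStep, if_neg (fun hp => hc ((sep_iff l).mp hp)), goA, hc]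
      exact ih acc (hd ++ l)

theorem goA_run (ws : List String) : ∀ (tail : List String) (hd : String),
    (∀ x ∈ ws, headersIsSep x = false) → goA hd (ws ++ tail) = goA (ws.foldl (· ++ ·) hd) tail := by
  induction ws with
  | nil => intro tail hd _; rfl
  | cons w ws ih =>
    intro tail hd hall
    have hw : headersIsSep w = false := hall w (by simp)
    simp only [List.cons_append, goA, hw, Bool.false_eq_true, if_false, List.foldl_cons]
    exact ih tail (hd ++ w) (fun x hx => hall x (by simp [hx]))

theorem len_foldl (ws : List String) : ∀ hd : String,
    PySem.Str.len hd ≤ PySem.Str.len (ws.foldl (· ++ ·) hd) := by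
  induction ws with
  | nil => intro hd; simp
  | cons w ws ih =>
    intro hd
    refine le_trans ?_ (ih (hd ++ w))
    simp [PySem.Str.len_eq]

theorem join_flatten (cs : List (List Char)) : PySem.Chars.join [] cs = cs.flatten := by
  induction cs with
  | nil => simp [PySem.Chars.join_nil]
  | cons p rest ih =>
    cases rest with
    | nil => simp [PySem.Chars.join_singleton]
    | cons q r => simp [PySem.Chars.join_cons_cons] at *; simp [ih]

theorem foldl_append_toList (ws : List String) : ∀ hd : String,
    (ws.foldl (· ++ ·) hd).toList = hd.toList ++ (ws.map String.toList).flatten := by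
  induction ws with
  | nil => intro hd; simp
  | cons w ws ih => intro hd; simp [ih (hd ++ w)]

theorem foldl_eq_join (ws : List String) :
    ws.foldl (· ++ ·) "" = PySem.Str.join "" ws := by
  apply String.toList_inj.mp
  have hnil : ("" : String).toList = [] := rfl
  rw [foldl_append_toList, PySem.Str.toList_join, hnil, join_flatten]
  simp

theorem dropWhile_head_sep (xs : List String) (b : String) (l : List String)
    (h : xs.dropWhile (fun x => !headersIsSep x) = b :: l) : headersIsSep b = true := by
  have := List.dropWhile_get_zero_not (fun x => !headersIsSep x) xs (by simp [h])
  simpa [h] using this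

theorem alt_nil : headers_alt [] = [] := by rw [headers_alt]

theorem alt_sep (l : String) (rest : List String) (hsep : headersIsSep l = true) :
    headers_alt (l :: rest) = headers_alt rest := by
  rw [headers_alt]; simp [hsep]

theorem alt_content_nil (l : String) (rest : List String) (hsep : ¬ headersIsSep l = true)
    (hdrop : (l :: rest).dropWhile (fun x => !headersIsSep x) = []) :
    headers_alt (l :: rest) = [] := by
  have hb : headersIsSep l = false := by simpa using hsep
  rw [headers_alt]
  simp only [hb, Bool.false_eq_true, if_false]
  split
  · rfl
  · rename_i s rest' heq
    rw [hdrop] at heq; cases heq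

theorem alt_content_cons (l : String) (rest : List String) (s : String) (rest' : List String)
    (hsep : ¬ headersIsSep l = true)
    (hdrop : (l :: rest).dropWhile (fun x => !headersIsSep x) = s :: rest') :
    headers_alt (l :: rest)
      = PySem.Str.join "" ((l :: rest).takeWhile (fun x => !headersIsSep x))
          :: headers_alt (s :: rest') := by
  have hb : headersIsSep l = false := by simpa using hsep
  rw [headers_alt]
  simp only [hb, Bool.false_eq_true, if_false]
  split
  · rename_i heq; rw [hdrop] at heq; cases heq
  · rename_i s2 rest2 heq
    rw [hdrop] at heq
    cases heq
    rfl

theorem goA_eq_alt (text : List String) : goA "" text = headers_alt text := by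
  induction text using headers_alt.induct with
  | case1 => rw [alt_nil]; rfl
  | case2 l rest hsep ih =>
    rw [alt_sep l rest hsep]
    simp only [goA, hsep, if_true, len_empty]
    simpa using ih
  | case3 l rest hsep hdrop =>
    have hall : ∀ x ∈ l :: rest, headersIsSep x = false := by
      intro x hx
      simpa using (List.dropWhile_eq_nil_iff.mp hdrop) x hx
    have := goA_run (l :: rest) [] "" hall
    simp only [List.append_nil] at this
    rw [this, alt_content_nil l rest hsep hdrop]
    rfl
  | case4 l rest hsep s rest' hdrop ih =>
    have hdecomp : l :: rest
        = (l :: rest).takeWhile (fun x => !headersIsSep x) ++ (s :: rest') := by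
      rw [← hdrop, List.takeWhile_append_dropWhile]
    have hall : ∀ x ∈ (l :: rest).takeWhile (fun x => !headersIsSep x), headersIsSep x = false := by
      intro x hx
      simpa using List.mem_takeWhile_imp hx
    have hsepS : headersIsSep s = true := dropWhile_head_sep _ _ _ hdrop
    have hrun : (l :: rest).takeWhile (fun x => !headersIsSep x)
        = l :: rest.takeWhile (fun x => !headersIsSep x) := by
      simp [hsep]
    have h3 : ¬ PySem.Str.len l < 3 := fun hlt => hsep ((sep_iff l).mp (Or.inl hlt))
    have hlen : 1 ≤ PySem.Str.len (((l :: rest).takeWhile (fun x => !headersIsSep x)).foldl (· ++ ·) "") := by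
      rw [hrun]
      simp only [List.foldl_cons]
      refine le_trans ?_ (len_foldl _ ("" ++ l))
      have : ("" ++ l) = l := by simp
      rw [this]
      omega
    conv_lhs => rw [hdecomp]
    rw [goA_run _ (s :: rest') "" hall]
    simp only [goA, hsepS, if_true, if_pos hlen]
    rw [foldl_eq_join, alt_content_cons l rest s rest' hsep hdrop]
    congr 1
    rw [← ih]
    simp [goA, hsepS]

-- ===== VERDICT =====
theorem headers_spec : Claim_equal_headers := by
  intro text _
  unfold Spec_headers
  rw [headers_eq_foldl, foldl_fst text [] "", goA_eq_alt]
  rfl
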